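-- pv_equiv track=rewrite | github.com/choderalab/openmm-constph | protons/app/proposals.py | _select_swaps_chenroux
-- ===== SOURCE A (Python) =====
-- def _select_swaps_chenroux(initial_charge: int, final_charge: int) -> dict:
--     """Select ions or water molecule swap procedure to facilitate maintaining charge neutrality while changing protonation states.
--
--     Notes
--     -----
--     Based on the method from Chen and Roux 2015.
--
--     Parameters
--     ----------
--     initial_charge - the initial charge of the residue
--     final_charge - the state of the residue after changing protonation states
--
--     Returns
--     -------
--     dict(water_to_cation, water_to_anion, cation_to_water, anion_to_water)
--
--     """
--
--     # Note that we don't allow for direct transitions between ions of different charge.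
--     swaps = dict(water_to_cation=0, water_to_anion=0, cation_to_water=0, anion_to_water=0)
--     charge_to_counter = final_charge - initial_charge
--
--     while abs(charge_to_counter) > 0:
--         # The protonation state change annihilates a positive charge
--         if (initial_charge > 0 >= final_charge) or (0 < final_charge < initial_charge):
--             swaps['water_to_cation'] += 1
--             charge_to_counter += 1
--             initial_charge -= 1 # One part of the initial charge has been countered
--
--         # The protonation state change annihilates a negative charge
--         elif initial_charge < 0 <= final_charge or (0 > final_charge > initial_charge):
--             swaps['water_to_anion'] += 1
--             charge_to_counter -= 1
--             initial_charge += 1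
--         # The protonation state change adds a negative charge
--         elif initial_charge == 0 > final_charge or (0 > initial_charge > final_charge):
--             swaps['anion_to_water'] += 1
--             charge_to_counter += 1
--             initial_charge -= 1
--         # The protonation state adds a positive charge
--         elif (initial_charge == 0 < final_charge) or (0 < initial_charge < final_charge):
--             swaps['cation_to_water'] += 1
--             charge_to_counter -= 1
--             initial_charge += 1
--         else:
--             raise ValueError("Impossible scenario reached.")
--     return swaps
-- ===== SOURCE B (Python) =====
-- def _select_swaps_chenroux(initial_charge: int, final_charge: int) -> dict:
--     """Closed-form count of ion/water swaps: the charge path from initial to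
--     final splits into a nonzero-sign phase (annihilating existing charge via
--     water_to_cation/water_to_anion) and a phase past zero (adding charge via
--     cation_to_water/anion_to_water); each count is O(1) arithmetic."""
--     i, f = initial_charge, final_charge
--     return dict(
--         water_to_cation=max(0, i - max(0, f)),
--         water_to_anion=max(0, min(0, f) - i),
--         cation_to_water=max(0, f - max(0, i)),
--         anion_to_water=max(0, min(0, i) - f),
--     )
-- ===== Notes on version B (the rewrite author's own statement) =====
-- stated objective: faster
-- what changed: Replaced the unit-step while loop over the charge difference by a closed-form arithmetic formula: each of the four swap counts is the length of the pre- or post-zero-crossing segment of the charge path, computed with max/min in O(1).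
import Mathlib
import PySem

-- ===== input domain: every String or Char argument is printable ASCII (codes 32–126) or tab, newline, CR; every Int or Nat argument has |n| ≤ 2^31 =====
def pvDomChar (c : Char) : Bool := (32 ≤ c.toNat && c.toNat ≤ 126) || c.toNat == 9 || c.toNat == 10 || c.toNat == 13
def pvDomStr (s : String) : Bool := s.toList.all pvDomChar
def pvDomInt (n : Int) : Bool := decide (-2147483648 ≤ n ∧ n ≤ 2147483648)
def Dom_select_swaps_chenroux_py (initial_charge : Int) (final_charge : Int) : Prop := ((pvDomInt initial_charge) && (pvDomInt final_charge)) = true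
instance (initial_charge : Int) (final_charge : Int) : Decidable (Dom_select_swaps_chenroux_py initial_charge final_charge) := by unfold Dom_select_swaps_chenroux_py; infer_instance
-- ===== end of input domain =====

-- B replaces A's unit-step while loop by a closed-form O(1) formula for each swap count.

-- ===== PORT A =====
-- Literal port of A's while loop; `ch` is charge_to_counter, `i` the mutating
-- initial_charge, `f` final_charge (never reassigned in Python). The recursion is
-- driven by a fuel equal to |charge_to_counter|, which is exactly the number of
-- iterations the Python loop performs (each iteration moves |ch| down by 1).
-- The Python `raise ValueError` branch is unreachable under the invariant
-- ch = f - i established by the entry point; it is modeled as returning swaps.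
def selectSwapsLoop : Nat → PySem.Dict String Int → Int → Int → Int → PySem.Dict String Int
  | 0, swaps, _, _, _ => swaps
  | Nat.succ n, swaps, ch, i, f =>
    if 0 < ch.natAbs then
      if (i > 0 ∧ 0 ≥ f) ∨ (0 < f ∧ f < i) then
        selectSwapsLoop n (PySem.Dict.modify swaps "water_to_cation" 0 (· + 1)) (ch + 1) (i - 1) f
      else if (i < 0 ∧ 0 ≤ f) ∨ (0 > f ∧ f > i) then
        selectSwapsLoop n (PySem.Dict.modify swaps "water_to_anion" 0 (· + 1)) (ch - 1) (i + 1) f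
      else if (i = 0 ∧ 0 > f) ∨ (0 > i ∧ i > f) then
        selectSwapsLoop n (PySem.Dict.modify swaps "anion_to_water" 0 (· + 1)) (ch + 1) (i - 1) f
      else if (i = 0 ∧ 0 < f) ∨ (0 < i ∧ i < f) then
        selectSwapsLoop n (PySem.Dict.modify swaps "cation_to_water" 0 (· + 1)) (ch - 1) (i + 1) f
      else
        swaps  -- Python: raise ValueError("Impossible scenario reached.") — unreachable from the entry point
    else swaps

def select_swaps_chenroux_py (initial_charge : Int) (final_charge : Int) : List (String × Int) :=
  (selectSwapsLoop (final_charge - initial_charge).natAbs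
    (PySem.Dict.ofList
      [("water_to_cation", 0), ("water_to_anion", 0), ("cation_to_water", 0), ("anion_to_water", 0)])
    (final_charge - initial_charge) initial_charge final_charge).items

-- ===== PORT B =====
def select_swaps_chenroux_py_alt (initial_charge : Int) (final_charge : Int) : List (String × Int) :=
  [("water_to_cation", max 0 (initial_charge - max 0 final_charge)),
   ("water_to_anion",  max 0 (min 0 final_charge - initial_charge)),
   ("cation_to_water", max 0 (final_charge - max 0 initial_charge)),
   ("anion_to_water",  max 0 (min 0 initial_charge - final_charge))]

-- ===== PRECONDITION & SPEC =====
def Spec_select_swaps_chenroux_py (initial_charge : Int) (final_charge : Int) (out : List (String × Int)) : Prop := out = select_swaps_chenroux_py_alt initial_charge final_charge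
instance (initial_charge : Int) (final_charge : Int) (out : List (String × Int)) : Decidable (Spec_select_swaps_chenroux_py initial_charge final_charge out) := by unfold Spec_select_swaps_chenroux_py; infer_instance

-- ===== CLAIM (what is proved, stated in full; the proofs are below) =====
def Claim_equal_select_swaps_chenroux_py : Prop := ∀ (initial_charge : Int) (final_charge : Int), Dom_select_swaps_chenroux_py initial_charge final_charge → Spec_select_swaps_chenroux_py initial_charge final_charge (select_swaps_chenroux_py initial_charge final_charge)

-- ===== LEMMAS AND PROOFS =====

-- Loop invariant: on the four-key dict with ch = f - i and fuel n = |f - i|,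
-- the loop adds the closed-form counts to the current accumulator values.
lemma selectSwapsLoop_closed (n : Nat) :
    ∀ (a b c d i f : Int), (f - i).natAbs = n →
    selectSwapsLoop n
      (PySem.Dict.mk [("water_to_cation", a), ("water_to_anion", b), ("cation_to_water", c), ("anion_to_water", d)])
      (f - i) i f
    = PySem.Dict.mk
      [("water_to_cation", a + max 0 (i - max 0 f)),
       ("water_to_anion",  b + max 0 (min 0 f - i)),
       ("cation_to_water", c + max 0 (f - max 0 i)),
       ("anion_to_water",  d + max 0 (min 0 i - f))] := by
  induction n with
  | zero =>
    intro a b c d i f hn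
    simp only [selectSwapsLoop, PySem.Dict.mk.injEq, List.cons.injEq, Prod.mk.injEq,
      true_and, and_true]
    refine ⟨?_, ?_, ?_, ?_⟩ <;> omega
  | succ n ih =>
    intro a b c d i f hn
    have hch : 0 < (f - i).natAbs := by omega
    rw [selectSwapsLoop]
    simp only [hch, if_true]
    split_ifs with h1 h2 h3 h4
    · rw [show PySem.Dict.modify
            (PySem.Dict.mk [("water_to_cation", a), ("water_to_anion", b), ("cation_to_water", c), ("anion_to_water", d)])
            "water_to_cation" 0 (· + 1)
          = PySem.Dict.mk [("water_to_cation", a + 1), ("water_to_anion", b), ("cation_to_water", c), ("anion_to_water", d)]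
          from by simp [PySem.Dict.modify, PySem.Dict.insert, PySem.Dict.getD, PySem.Dict.get?, PySem.Dict.contains]]
      rw [show f - i + 1 = f - (i - 1) from by ring, ih _ _ _ _ _ _ (by omega)]
      simp only [PySem.Dict.mk.injEq, List.cons.injEq, Prod.mk.injEq, true_and, and_true]
      refine ⟨?_, ?_, ?_, ?_⟩ <;> omega
    · rw [show PySem.Dict.modify
            (PySem.Dict.mk [("water_to_cation", a), ("water_to_anion", b), ("cation_to_water", c), ("anion_to_water", d)])
            "water_to_anion" 0 (· + 1)
          = PySem.Dict.mk [("water_to_cation", a), ("water_to_anion", b + 1), ("cation_to_water", c), ("anion_to_water", d)]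
          from by simp [PySem.Dict.modify, PySem.Dict.insert, PySem.Dict.getD, PySem.Dict.get?, PySem.Dict.contains]]
      rw [show f - i - 1 = f - (i + 1) from by ring, ih _ _ _ _ _ _ (by omega)]
      simp only [PySem.Dict.mk.injEq, List.cons.injEq, Prod.mk.injEq, true_and, and_true]
      refine ⟨?_, ?_, ?_, ?_⟩ <;> omega
    · rw [show PySem.Dict.modify
            (PySem.Dict.mk [("water_to_cation", a), ("water_to_anion", b), ("cation_to_water", c), ("anion_to_water", d)])
            "anion_to_water" 0 (· + 1)
          = PySem.Dict.mk [("water_to_cation", a), ("water_to_anion", b), ("cation_to_water", c), ("anion_to_water", d + 1)]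
          from by simp [PySem.Dict.modify, PySem.Dict.insert, PySem.Dict.getD, PySem.Dict.get?, PySem.Dict.contains]]
      rw [show f - i + 1 = f - (i - 1) from by ring, ih _ _ _ _ _ _ (by omega)]
      simp only [PySem.Dict.mk.injEq, List.cons.injEq, Prod.mk.injEq, true_and, and_true]
      refine ⟨?_, ?_, ?_, ?_⟩ <;> omega
    · rw [show PySem.Dict.modify
            (PySem.Dict.mk [("water_to_cation", a), ("water_to_anion", b), ("cation_to_water", c), ("anion_to_water", d)])
            "cation_to_water" 0 (· + 1)
          = PySem.Dict.mk [("water_to_cation", a), ("water_to_anion", b), ("cation_to_water", c + 1), ("anion_to_water", d)]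
          from by simp [PySem.Dict.modify, PySem.Dict.insert, PySem.Dict.getD, PySem.Dict.get?, PySem.Dict.contains]]
      rw [show f - i - 1 = f - (i + 1) from by ring, ih _ _ _ _ _ _ (by omega)]
      simp only [PySem.Dict.mk.injEq, List.cons.injEq, Prod.mk.injEq, true_and, and_true]
      refine ⟨?_, ?_, ?_, ?_⟩ <;> omega
    · exfalso; omega

-- ===== VERDICT (by name: the statement is the Claim_ definition above) =====
theorem select_swaps_chenroux_py_spec : Claim_equal_select_swaps_chenroux_py := by
  intro i f _
  unfold Spec_select_swaps_chenroux_py select_swaps_chenroux_py select_swaps_chenroux_py_alt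
  rw [show PySem.Dict.ofList
        [("water_to_cation", (0:Int)), ("water_to_anion", 0), ("cation_to_water", 0), ("anion_to_water", 0)]
      = PySem.Dict.mk [("water_to_cation", 0), ("water_to_anion", 0), ("cation_to_water", 0), ("anion_to_water", 0)]
      from by simp [PySem.Dict.ofList, PySem.Dict.update, PySem.Dict.insert, PySem.Dict.empty, PySem.Dict.contains]]
  rw [selectSwapsLoop_closed (f - i).natAbs 0 0 0 0 i f rfl]
  simp
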